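-- pv_equiv track=rewrite | github.com/Eric-Xu/streamlit-hmm-nj-tr-pr-20250203 | utils/borrower.py | get_borrower_to_last_lender
-- ===== SOURCE A (Python) =====
-- from typing import Dict, List, Set
--
-- def get_borrower_to_last_lender(prepped_data: List[Dict]) -> Dict[str, str]:
--     """
--     For each borrower (buyerName), find the lender (lenderName) from their most recent loan (by saleDate).
--     Returns a dict mapping borrower name to last lender name.
--     """
--     borrower_to_latest: Dict[str, Dict] = {}
--     for record in prepped_data:
--         borrower = record.get("buyerName")
--         date = record.get("saleDate")
--         if not borrower or not date:
--             continue
--         if (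
--             borrower not in borrower_to_latest
--             or date > borrower_to_latest[borrower]["saleDate"]
--         ):
--             borrower_to_latest[borrower] = record
--     # Map borrower to their last lender
--     return {
--         borrower: rec.get("lenderName", "")
--         for borrower, rec in borrower_to_latest.items()
--     }
-- ===== SOURCE B (Python) =====
-- def get_borrower_to_last_lender(prepped_data):
--     valid = [r for r in prepped_data
--              if r.get("buyerName") and r.get("saleDate")]
--     result = {}
--     for r in valid:
--         b = r["buyerName"]
--         if b not in result:
--             best = max((x for x in valid if x["buyerName"] == b),
--                        key=lambda x: x["saleDate"])
--             result[b] = best.get("lenderName", "")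
--     return result
-- ===== Notes on version B (the rewrite author's own statement) =====
-- stated objective: alternative
-- what changed: Replaces A's single-pass running-max-per-borrower dict of full records by filtering the valid records once and, at each borrower's first occurrence, taking max() of that borrower's valid records by saleDate (Python max keeps the first maximal element, matching A's strict-> tie rule).
import Mathlib
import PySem

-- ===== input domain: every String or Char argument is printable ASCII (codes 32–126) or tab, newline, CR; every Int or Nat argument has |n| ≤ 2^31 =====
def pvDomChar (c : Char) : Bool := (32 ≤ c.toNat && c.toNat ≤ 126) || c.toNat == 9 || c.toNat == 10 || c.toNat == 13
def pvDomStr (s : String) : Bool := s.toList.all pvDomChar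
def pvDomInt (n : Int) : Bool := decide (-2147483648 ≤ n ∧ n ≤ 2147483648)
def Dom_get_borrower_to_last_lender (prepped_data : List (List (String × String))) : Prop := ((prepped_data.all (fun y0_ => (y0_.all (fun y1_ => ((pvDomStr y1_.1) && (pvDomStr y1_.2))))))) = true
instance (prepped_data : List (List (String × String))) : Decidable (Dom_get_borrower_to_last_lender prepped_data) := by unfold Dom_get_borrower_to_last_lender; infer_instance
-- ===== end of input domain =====

-- B replaces A's single-pass running-max dict by an inner max()-scan per first-seen borrower
-- (objective: alternative decomposition, not faster). Both ports treat a record as an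
-- association list with first-match lookup (Python dict .get / [] on the record).

-- ===== PORT A =====
-- record.get(k): first-match lookup in the association list (Python dict semantics)
def pvGetRec (r : List (String × String)) (k : String) : Option String :=
  (r.find? (fun p => p.1 == k)).map (·.2)

-- Python truthiness of record.get(k): None and "" are falsy
def pvTruthy (o : Option String) : Bool :=
  match o with
  | none => false
  | some s => !(s == "")

def get_borrower_to_last_lender (prepped_data : List (List (String × String))) : List (String × String) :=
  let borrower_to_latest : PySem.Dict String (List (String × String)) :=
    prepped_data.foldl (fun d record =>
      let borrower := pvGetRec record "buyerName"
      let date := pvGetRec record "saleDate"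
      if !pvTruthy borrower || !pvTruthy date then d
      else
        -- d[borrower]["saleDate"] ported with getD: both keys are present whenever
        -- this branch reads them (stored records are valid), so this is exact
        if !(d.contains (borrower.getD "")) ||
            decide (((pvGetRec ((d.get? (borrower.getD "")).getD []) "saleDate").getD "") < date.getD "") then
          d.insert (borrower.getD "") record
        else d) PySem.Dict.empty
  (borrower_to_latest.items.foldl
      (fun res p => res.insert p.1 ((pvGetRec p.2 "lenderName").getD ""))
      (PySem.Dict.empty : PySem.Dict String String)).items

-- ===== PORT B =====
def get_borrower_to_last_lender_alt (prepped_data : List (List (String × String))) : List (String × String) :=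
  let valid := prepped_data.filter (fun r =>
    pvTruthy (pvGetRec r "buyerName") && pvTruthy (pvGetRec r "saleDate"))
  (valid.foldl (fun res r =>
      let b := (pvGetRec r "buyerName").getD ""
      if res.contains b then res
      else
        -- x["buyerName"], x["saleDate"] ported with getD: present on every valid record
        match PySem.List.max? (valid.filter (fun x => (pvGetRec x "buyerName").getD "" == b))
                (fun x => (pvGetRec x "saleDate").getD "") with
        | some best => res.insert b ((pvGetRec best "lenderName").getD "")
        | none => res) (PySem.Dict.empty : PySem.Dict String String)).items

-- ===== PRECONDITION & SPEC =====
def Spec_get_borrower_to_last_lender (prepped_data : List (List (String × String))) (out : List (String × String)) : Prop := out = get_borrower_to_last_lender_alt prepped_data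
instance (prepped_data : List (List (String × String))) (out : List (String × String)) : Decidable (Spec_get_borrower_to_last_lender prepped_data out) := by unfold Spec_get_borrower_to_last_lender; infer_instance

-- ===== CLAIM (what is proved, stated in full; the proofs are below) =====
def Claim_equal_get_borrower_to_last_lender : Prop := ∀ (prepped_data : List (List (String × String))), Dom_get_borrower_to_last_lender prepped_data → Spec_get_borrower_to_last_lender prepped_data (get_borrower_to_last_lender prepped_data)

-- ===== LEMMAS AND PROOFS =====

-- field abbreviations and the two loop bodies (definitionally the lambdas in the ports)
def pvKf (r : List (String × String)) : String := (pvGetRec r "buyerName").getD ""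
def pvDf (r : List (String × String)) : String := (pvGetRec r "saleDate").getD ""
def pvLf (r : List (String × String)) : String := (pvGetRec r "lenderName").getD ""
def pvOk (r : List (String × String)) : Bool :=
  pvTruthy (pvGetRec r "buyerName") && pvTruthy (pvGetRec r "saleDate")

def pvStepA (d : PySem.Dict String (List (String × String))) (record : List (String × String)) :
    PySem.Dict String (List (String × String)) :=
  let borrower := pvGetRec record "buyerName"
  let date := pvGetRec record "saleDate"
  if !pvTruthy borrower || !pvTruthy date then d
  else
    if !(d.contains (borrower.getD "")) ||
        decide (((pvGetRec ((d.get? (borrower.getD "")).getD []) "saleDate").getD "") < date.getD "") then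
      d.insert (borrower.getD "") record
    else d

def pvStepB (valid : List (List (String × String))) (res : PySem.Dict String String)
    (r : List (String × String)) : PySem.Dict String String :=
  let b := (pvGetRec r "buyerName").getD ""
  if res.contains b then res
  else
    match PySem.List.max? (valid.filter (fun x => (pvGetRec x "buyerName").getD "" == b))
            (fun x => (pvGetRec x "saleDate").getD "") with
    | some best => res.insert b ((pvGetRec best "lenderName").getD "")
    | none => res

-- Python max(..., key): fold step, and the first record attaining the max date for borrower b
def pvBest (acc : Option (List (String × String))) (x : List (String × String)) :
    Option (List (String × String)) :=
  match acc with
  | none => some x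
  | some m => if pvDf m < pvDf x then some x else some m

def pvFm (V : List (List (String × String))) (b : String) : Option (List (String × String)) :=
  PySem.List.max? (V.filter (fun x => pvKf x == b)) (fun x => pvDf x)

def pvKeys (V : List (List (String × String))) : List String := PySem.List.dedup (V.map pvKf)

def pvDictA (V : List (List (String × String))) : PySem.Dict String (List (String × String)) :=
  PySem.Dict.mk ((pvKeys V).map (fun b => (b, (pvFm V b).getD [])))

lemma pvStepA_skip (d : PySem.Dict String (List (String × String)))
    (r : List (String × String)) (h : pvOk r = false) : pvStepA d r = d := by
  unfold pvOk at h
  unfold pvStepA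
  rw [Bool.and_eq_false_iff] at h
  rcases h with h | h <;> simp [h]

lemma pvFoldA_filter (l : List (List (String × String)))
    (d : PySem.Dict String (List (String × String))) :
    l.foldl pvStepA d = (l.filter pvOk).foldl pvStepA d := by
  induction l generalizing d with
  | nil => rfl
  | cons h t ih =>
    by_cases hk : pvOk h = true
    · simp [hk, ih]
    · simp only [Bool.not_eq_true] at hk
      simp [hk, pvStepA_skip d h hk, ih]

lemma pvDedup_append (l : List String) (x : String) :
    PySem.List.dedup (l ++ [x]) =
      if x ∈ l then PySem.List.dedup l else PySem.List.dedup l ++ [x] := by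
  simp only [PySem.List.dedup, PySem.Set.ofList, List.foldl_append, List.foldl_cons,
    List.foldl_nil]
  rw [PySem.Set.add]
  by_cases h : x ∈ l
  · have hc : (List.foldl PySem.Set.add PySem.Set.empty l).contains x = true := by
      have : x ∈ PySem.Set.ofList l := (PySem.Set.mem_ofList l x).mpr h
      simpa [PySem.Set.ofList, List.contains_iff_mem] using this
    rw [hc, if_pos rfl, if_pos h]
  · have hc : (List.foldl PySem.Set.add PySem.Set.empty l).contains x = false := by
      have : x ∉ PySem.Set.ofList l := fun hx => h ((PySem.Set.mem_ofList l x).mp hx)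
      simpa [PySem.Set.ofList, List.contains_iff_mem] using this
    rw [hc, if_neg (by simp), if_neg h]

lemma pvMax?_append (xs : List (List (String × String))) (x : List (String × String)) :
    PySem.List.max? (xs ++ [x]) (fun y => pvDf y) =
      pvBest (PySem.List.max? xs (fun y => pvDf y)) x := by
  cases ho : PySem.List.max? xs (fun y => pvDf y) with
  | none =>
    unfold PySem.List.max? at ho ⊢
    rw [List.foldl_append, ho]
    rfl
  | some m =>
    unfold PySem.List.max? at ho ⊢
    rw [List.foldl_append, ho]
    rfl

lemma pvFm_append (V : List (List (String × String))) (r : List (String × String)) (b : String) :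
    pvFm (V ++ [r]) b =
      if pvKf r == b then pvBest (pvFm V b) r else pvFm V b := by
  unfold pvFm
  rw [List.filter_append]
  by_cases h : pvKf r == b
  · rw [if_pos h]
    simp only [List.filter_cons, List.filter_nil, h, if_pos]
    exact pvMax?_append (List.filter (fun x => pvKf x == b) V) r
  · rw [if_neg h]
    simp only [List.filter_cons, List.filter_nil, h]
    simp

lemma pvFm_some (V : List (List (String × String))) (b : String) (h : b ∈ V.map pvKf) :
    ∃ m, pvFm V b = some m := by
  obtain ⟨r, hr, hk⟩ := List.mem_map.mp h
  cases hfm : pvFm V b with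
  | some m => exact ⟨m, rfl⟩
  | none =>
    rw [pvFm] at hfm
    have hnil := (PySem.List.max?_eq_none_iff (V.filter (fun x => pvKf x == b))
      (fun x => pvDf x)).mp hfm
    rw [List.filter_eq_nil_iff] at hnil
    exact ((hnil r hr) (by simp [hk])).elim

lemma pvFm_none (V : List (List (String × String))) (b : String) (h : b ∉ V.map pvKf) :
    pvFm V b = none := by
  rw [pvFm]
  apply (PySem.List.max?_eq_none_iff (V.filter (fun x => pvKf x == b)) (fun x => pvDf x)).mpr
  rw [List.filter_eq_nil_iff]
  intro r hr hk
  exact h (List.mem_map.mpr ⟨r, hr, by simpa using hk⟩)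

lemma pvDictA_keys (V : List (List (String × String))) : (pvDictA V).keys = pvKeys V := by
  simp [pvDictA, PySem.Dict.keys, List.map_map, Function.comp_def]

lemma pvKeys_append_mem (V : List (List (String × String))) (r : List (String × String))
    (hb : pvKf r ∈ V.map pvKf) : pvKeys (V ++ [r]) = pvKeys V := by
  rw [pvKeys, List.map_append, List.map_singleton, pvDedup_append, if_pos hb]; rfl

lemma pvKeys_append_not_mem (V : List (List (String × String))) (r : List (String × String))
    (hb : pvKf r ∉ V.map pvKf) : pvKeys (V ++ [r]) = pvKeys V ++ [pvKf r] := by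
  rw [pvKeys, List.map_append, List.map_singleton, pvDedup_append, if_neg hb]; rfl

lemma pvFoldA_spec (V : List (List (String × String))) (hV : ∀ r ∈ V, pvOk r = true) :
    V.foldl pvStepA PySem.Dict.empty = pvDictA V := by
  induction V using List.reverseRecOn with
  | nil => rfl
  | append_singleton V r ih =>
    have hV' : ∀ x ∈ V, pvOk x = true := fun x hx => hV x (by simp [hx])
    have hok : pvOk r = true := hV r (by simp)
    rw [List.foldl_append, List.foldl_cons, List.foldl_nil, ih hV']
    have h1 : pvTruthy (pvGetRec r "buyerName") = true := ((Bool.and_eq_true _ _).mp hok).1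
    have h2 : pvTruthy (pvGetRec r "saleDate") = true := ((Bool.and_eq_true _ _).mp hok).2
    unfold pvStepA
    simp only [h1, h2, Bool.not_true, Bool.or_self]
    rw [if_neg (by simp)]
    have hkf : (pvGetRec r "buyerName").getD "" = pvKf r := rfl
    have hdf : (pvGetRec r "saleDate").getD "" = pvDf r := rfl
    rw [hkf, hdf]
    by_cases hb : pvKf r ∈ V.map pvKf
    · have hmemk : pvKf r ∈ pvKeys V := by
        rw [pvKeys]; exact (PySem.List.mem_dedup _ _).mpr hb
      have hcont : (pvDictA V).contains (pvKf r) = true :=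
        (PySem.Dict.contains_iff_mem_keys _ _).mpr (by rw [pvDictA_keys]; exact hmemk)
      obtain ⟨m, hm⟩ := pvFm_some V (pvKf r) hb
      have hnodup : (pvDictA V).keys.Nodup := by
        rw [pvDictA_keys, pvKeys]; exact PySem.List.nodup_dedup _
      have hmemitems : (pvKf r, (pvFm V (pvKf r)).getD []) ∈ (pvDictA V).items :=
        List.mem_map.mpr ⟨pvKf r, hmemk, rfl⟩
      have hget : (pvDictA V).get? (pvKf r) = some ((pvFm V (pvKf r)).getD []) :=
        PySem.Dict.get?_of_mem_items _ hmemitems hnodup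
      rw [hcont, hget, hm]
      have hdfm : (pvGetRec m "saleDate").getD "" = pvDf m := rfl
      simp only [Option.getD_some, Bool.not_true, Bool.false_or, hdfm]
      by_cases hlt : pvDf m < pvDf r
      · rw [if_pos (by simp [hlt])]
        apply PySem.Dict.ext
        rw [PySem.Dict.items_insert_of_contains _ _ hcont]
        show ((pvKeys V).map _).map _ = _
        rw [List.map_map, pvDictA, pvKeys_append_mem V r hb]
        apply List.map_congr_left
        intro b' hb'
        by_cases hbe : b' = pvKf r
        · subst hbe
          simp [pvFm_append, hm, hlt, pvBest]
        · have : (pvKf r == b') = false := by simp [Ne.symm hbe]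
          simp [Function.comp, hbe, pvFm_append, this]
      · rw [if_neg (by simp [hlt])]
        apply PySem.Dict.ext
        show (pvKeys V).map _ = _
        rw [pvDictA, pvKeys_append_mem V r hb]
        apply List.map_congr_left
        intro b' hb'
        by_cases hbe : b' = pvKf r
        · subst hbe
          simp [pvFm_append, hm, hlt, pvBest]
        · have : (pvKf r == b') = false := by simp [Ne.symm hbe]
          simp [pvFm_append, this]
    · have hcont : (pvDictA V).contains (pvKf r) = false := by
        rw [← Bool.not_eq_true]
        intro hc
        exact hb (by
          have := (PySem.Dict.contains_iff_mem_keys _ _).mp hc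
          rw [pvDictA_keys, pvKeys] at this
          exact (PySem.List.mem_dedup _ _).mp this)
      rw [hcont]
      rw [if_pos (by simp)]
      apply PySem.Dict.ext
      rw [PySem.Dict.items_insert_of_not_contains _ _ hcont]
      show (pvKeys V).map _ ++ _ = _
      rw [pvDictA, pvKeys_append_not_mem V r hb, List.map_append, List.map_singleton]
      congr 1
      · apply List.map_congr_left
        intro b' hb'
        have hbne : b' ≠ pvKf r := by
          intro he
          apply hb
          rw [← he]
          exact (PySem.List.mem_dedup _ _).mp (by rw [pvKeys] at hb'; exact hb')
        have : (pvKf r == b') = false := by simp [Ne.symm hbne]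
        simp [pvFm_append, this]
      · have hnone : pvFm V (pvKf r) = none := pvFm_none V (pvKf r) hb
        simp [pvFm_append, hnone, pvBest]

lemma pvFoldB_spec (W V : List (List (String × String))) (hW : ∀ r ∈ W, pvKf r ∈ V.map pvKf) :
    W.foldl (pvStepB V) PySem.Dict.empty =
      PySem.Dict.mk ((pvKeys W).map (fun b => (b, pvLf ((pvFm V b).getD [])))) := by
  induction W using List.reverseRecOn with
  | nil => rfl
  | append_singleton W r ih =>
    have hW' : ∀ x ∈ W, pvKf x ∈ V.map pvKf := fun x hx => hW x (by simp [hx])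
    have hr : pvKf r ∈ V.map pvKf := hW r (by simp)
    rw [List.foldl_append, List.foldl_cons, List.foldl_nil, ih hW']
    set dB := PySem.Dict.mk ((pvKeys W).map (fun b => (b, pvLf ((pvFm V b).getD [])))) with hdB
    have hkeysB : dB.keys = pvKeys W := by
      simp [hdB, PySem.Dict.keys, List.map_map, Function.comp_def]
    unfold pvStepB
    show (if dB.contains (pvKf r) = true then dB
      else
        match PySem.List.max? (V.filter (fun x => (pvGetRec x "buyerName").getD "" == pvKf r))
            (fun x => (pvGetRec x "saleDate").getD "") with
        | some best => dB.insert (pvKf r) ((pvGetRec best "lenderName").getD "")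
        | none => dB) = _
    have hfmEq : PySem.List.max? (V.filter (fun x => (pvGetRec x "buyerName").getD "" == pvKf r))
        (fun x => (pvGetRec x "saleDate").getD "") = pvFm V (pvKf r) := rfl
    rw [hfmEq]
    by_cases hb : pvKf r ∈ W.map pvKf
    · have hcont : dB.contains (pvKf r) = true :=
        (PySem.Dict.contains_iff_mem_keys _ _).mpr
          (by rw [hkeysB, pvKeys]; exact (PySem.List.mem_dedup _ _).mpr hb)
      rw [hcont, if_pos rfl, hdB, pvKeys_append_mem W r hb]
    · have hcont : dB.contains (pvKf r) = false := by
        rw [← Bool.not_eq_true]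
        intro hc
        have := (PySem.Dict.contains_iff_mem_keys _ _).mp hc
        rw [hkeysB, pvKeys] at this
        exact hb ((PySem.List.mem_dedup _ _).mp this)
      rw [hcont, if_neg (by simp)]
      obtain ⟨m, hm⟩ := pvFm_some V (pvKf r) hr
      rw [hm]
      apply PySem.Dict.ext
      rw [PySem.Dict.items_insert_of_not_contains _ _ hcont]
      show (pvKeys W).map _ ++ _ = _
      rw [pvKeys_append_not_mem W r hb, List.map_append, List.map_singleton]
      congr 1
      rw [hm]
      rfl

-- ===== VERDICT (by name: the statement is the Claim_ definition above) =====
theorem get_borrower_to_last_lender_spec : Claim_equal_get_borrower_to_last_lender := by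
  intro pd _
  unfold Spec_get_borrower_to_last_lender get_borrower_to_last_lender get_borrower_to_last_lender_alt
  show ((pd.foldl pvStepA PySem.Dict.empty).items.foldl
        (fun res p => res.insert p.1 ((pvGetRec p.2 "lenderName").getD ""))
        (PySem.Dict.empty : PySem.Dict String String)).items
      = ((pd.filter pvOk).foldl (pvStepB (pd.filter pvOk)) PySem.Dict.empty).items
  rw [pvFoldA_filter, pvFoldA_spec (pd.filter pvOk) (fun r hr => (List.mem_filter.mp hr).2),
    pvFoldB_spec (pd.filter pvOk) (pd.filter pvOk) (fun r hr => List.mem_map_of_mem hr)]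
  rw [PySem.Dict.items_foldl_insert_fresh (pvDictA (pd.filter pvOk)).items (fun p => p.1)
      (fun p => (pvGetRec p.2 "lenderName").getD "") PySem.Dict.empty
      (fun a _ => rfl)
      (by rw [show ((pvDictA (pd.filter pvOk)).items.map (fun p => p.1)) =
                (pvDictA (pd.filter pvOk)).keys from rfl, pvDictA_keys, pvKeys]
          exact PySem.List.nodup_dedup _)]
  simp [pvDictA, PySem.Dict.empty, List.map_map, Function.comp_def, pvLf]
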